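-- pv_equiv track=rewrite | github.com/MrGallo/advent-of-code-solutions | 2015/Day 11/day11_both.py | has_two_diff_pairs
-- ===== SOURCE A (Python) =====
-- def has_two_diff_pairs(string):
--     first_match = None
--     i = 0
--     while i < len(string)-1:
--         char = string[i]
--         next_char = string[i+1]
--
--         if char == next_char:
--             if not first_match:
--                 first_match = char
--             elif char != first_match:
--                 return True
--         i += 1
--
--     return False
-- ===== SOURCE B (Python) =====
-- def has_two_diff_pairs(string):
--     # Run-length encode the string, then collect the set of characters
--     # whose run has length >= 2; two distinct doubled chars => True.
--     runs = []
--     for ch in string: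
--         if runs and runs[-1][0] == ch:
--             runs[-1][1] += 1
--         else:
--             runs.append([ch, 1])
--     doubled = {ch for ch, cnt in runs if cnt >= 2}
--     return len(doubled) >= 2
-- ===== Notes on version B (the rewrite author's own statement) =====
-- stated objective: alternative
-- what changed: Replaces the index-pair while-loop with a sentinel and early return by a run-length encoding pass that collects the set of doubled characters and tests whether it has at least two elements.
import Mathlib
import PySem

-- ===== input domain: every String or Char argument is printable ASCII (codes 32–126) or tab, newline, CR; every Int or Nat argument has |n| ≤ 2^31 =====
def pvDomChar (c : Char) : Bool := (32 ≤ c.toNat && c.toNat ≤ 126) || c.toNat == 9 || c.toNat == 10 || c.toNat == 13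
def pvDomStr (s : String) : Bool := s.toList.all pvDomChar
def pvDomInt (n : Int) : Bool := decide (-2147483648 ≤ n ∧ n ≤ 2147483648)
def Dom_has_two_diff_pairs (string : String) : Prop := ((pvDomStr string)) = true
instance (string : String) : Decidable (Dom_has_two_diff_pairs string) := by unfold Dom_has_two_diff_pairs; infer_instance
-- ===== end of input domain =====

-- B replaces A's index-pair scan with a sentinel/early-return by a run-length
-- encoding pass collecting the set of doubled characters (alternative decomposition).

-- ===== PORT A =====
-- A's while-loop over adjacent index pairs, with first_match : Option Char
def pvLoopA : List Char → Option Char → Bool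
  | a :: b :: t, fm =>
    if a = b then
      match fm with
      | none => pvLoopA (b :: t) (some a)
      | some f => if a ≠ f then true else pvLoopA (b :: t) (some f)
    else pvLoopA (b :: t) fm
  | _, _ => false

def has_two_diff_pairs (string : String) : Bool :=
  pvLoopA string.toList none

-- ===== PORT B =====
-- runs kept in REVERSE order so that Python's runs[-1] (the last run) is the head
def pvStepB (acc : List (Char × Nat)) (ch : Char) : List (Char × Nat) :=
  match acc with
  | (d, n) :: t => if d = ch then (d, n + 1) :: t else (ch, 1) :: (d, n) :: t
  | [] => [(ch, 1)]

def has_two_diff_pairs_alt (string : String) : Bool :=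
  let runs := (string.toList.foldl pvStepB []).reverse
  let doubled : PySem.Set Char :=
    PySem.Set.ofList ((runs.filter (fun p => 2 ≤ p.2)).map Prod.fst)
  decide (2 ≤ doubled.length)

-- ===== PRECONDITION & SPEC =====
def Spec_has_two_diff_pairs (string : String) (out : Bool) : Prop := out = has_two_diff_pairs_alt string
instance (string : String) (out : Bool) : Decidable (Spec_has_two_diff_pairs string out) := by unfold Spec_has_two_diff_pairs; infer_instance

-- ===== CLAIM (what is proved, stated in full; the proofs are below) =====
def Claim_equal_has_two_diff_pairs : Prop := ∀ (string : String), Dom_has_two_diff_pairs string → Spec_has_two_diff_pairs string (has_two_diff_pairs string)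

-- ===== LEMMAS AND PROOFS =====

-- the list of characters of the adjacent equal pairs, in order
def pairChars : List Char → List Char
  | a :: b :: t => (if a = b then [a] else []) ++ pairChars (b :: t)
  | _ => []

theorem loopA_some_eq : ∀ (l : List Char) (f : Char),
    pvLoopA l (some f) = (pairChars l).any (fun c => decide (c ≠ f))
  | [], _ => rfl
  | [_], _ => rfl
  | a :: b :: t, f => by
    by_cases h : a = b <;>
      simp [pvLoopA, pairChars, h, loopA_some_eq (b :: t) f]

theorem loopA_none_eq : ∀ (l : List Char),
    pvLoopA l none =
      (match pairChars l with
       | [] => false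
       | f :: rest => rest.any (fun c => decide (c ≠ f)))
  | [] => rfl
  | [_] => rfl
  | a :: b :: t => by
    by_cases h : a = b
    · simp [pvLoopA, pairChars, h, loopA_some_eq (b :: t) b]
    · simp [pvLoopA, pairChars, h, loopA_none_eq (b :: t)]

-- membership in the doubled runs of an accumulator
def mem2 (rs : List (Char × Nat)) (c : Char) : Prop :=
  ∃ p ∈ rs, p.1 = c ∧ 2 ≤ p.2

theorem foldl_step_mem2 : ∀ (l : List Char) (d : Char) (n : Nat) (t : List (Char × Nat))
    (_ : 1 ≤ n) (c : Char),
    mem2 (l.foldl pvStepB ((d, n) :: t)) c ↔ mem2 ((d, n) :: t) c ∨ c ∈ pairChars (d :: l)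
  | [], d, n, t, _, c => by simp [pairChars]
  | e :: l', d, n, t, hn, c => by
    by_cases h : d = e
    · subst h
      have ih := foldl_step_mem2 l' d (n + 1) t (by omega) c
      simp only [List.foldl_cons, pvStepB, if_true] at *
      rw [ih]
      constructor
      · rintro (h2 | h2)
        · rcases h2 with ⟨p, hp, hpc, hp2⟩
          rcases List.mem_cons.mp hp with h3 | h3
          · subst h3
            by_cases hcn : 2 ≤ n
            · exact Or.inl ⟨(d, n), by simp, hpc, hcn⟩
            · refine Or.inr ?_
              simp only [pairChars, List.mem_append]
              exact Or.inl (by simp [hpc.symm])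
          · exact Or.inl ⟨p, List.mem_cons_of_mem _ h3, hpc, hp2⟩
        · refine Or.inr ?_
          simp only [pairChars, List.mem_append]
          exact Or.inr (by simpa using h2)
      · rintro (h2 | h2)
        · rcases h2 with ⟨p, hp, hpc, hp2⟩
          rcases List.mem_cons.mp hp with h3 | h3
          · subst h3
            exact Or.inl ⟨(d, n + 1), by simp, hpc, by omega⟩
          · exact Or.inl ⟨p, List.mem_cons_of_mem _ h3, hpc, hp2⟩
        · simp only [pairChars, List.mem_append, ite_true, List.mem_singleton] at h2
          rcases h2 with h2 | h2
          · exact Or.inl ⟨(d, n + 1), by simp, h2.symm, by omega⟩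
          · exact Or.inr h2
    · have ih := foldl_step_mem2 l' e 1 ((d, n) :: t) (le_refl 1) c
      simp only [List.foldl_cons, pvStepB, if_neg h] at *
      rw [ih]
      have h1 : mem2 ((e, 1) :: (d, n) :: t) c ↔ mem2 ((d, n) :: t) c := by
        constructor
        · rintro ⟨p, hp, hpc, hp2⟩
          rcases List.mem_cons.mp hp with h3 | h3
          · subst h3; omega
          · exact ⟨p, h3, hpc, hp2⟩
        · rintro ⟨p, hp, hpc, hp2⟩
          exact ⟨p, List.mem_cons_of_mem _ hp, hpc, hp2⟩
      rw [h1]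
      have h2 : pairChars (d :: e :: l') = pairChars (e :: l') := by
        simp [pairChars, h]
      rw [h2]

theorem doubled_mem (l : List Char) (c : Char) :
    (c ∈ (((l.foldl pvStepB []).reverse.filter (fun p => 2 ≤ p.2)).map Prod.fst)) ↔
      c ∈ pairChars l := by
  have hmem : (c ∈ (((l.foldl pvStepB []).reverse.filter (fun p => 2 ≤ p.2)).map Prod.fst)) ↔
      mem2 (l.foldl pvStepB []) c := by
    simp only [mem2, List.mem_map, List.mem_filter, List.mem_reverse]
    constructor
    · rintro ⟨p, ⟨hp, h2⟩, hc⟩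
      exact ⟨p, hp, hc, by simpa using h2⟩
    · rintro ⟨p, hp, hc, h2⟩
      exact ⟨p, ⟨hp, by simpa using h2⟩, hc⟩
  rw [hmem]
  cases l with
  | nil => simp [mem2, pairChars]
  | cons a l' =>
    have : (a :: l').foldl pvStepB [] = l'.foldl pvStepB [(a, 1)] := by
      simp [pvStepB]
    rw [this, foldl_step_mem2 l' a 1 [] (le_refl 1) c]
    simp [mem2]

-- a Nodup list has length ≥ 2 iff it contains two distinct elements
theorem nodup_two_le (S : List Char) (hnd : S.Nodup) :
    2 ≤ S.length ↔ ∃ a ∈ S, ∃ b ∈ S, a ≠ b := by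
  match S with
  | [] => simp
  | [x] => simp
  | a :: b :: t =>
    simp only [List.length_cons, Nat.le_add_left, true_iff]
    refine ⟨a, by simp, b, by simp, ?_⟩
    intro h; subst h
    exact (List.nodup_cons.mp hnd).1 (by simp)

theorem alt_eq (s : String) :
    has_two_diff_pairs_alt s =
      decide (∃ a ∈ pairChars s.toList, ∃ b ∈ pairChars s.toList, a ≠ b) := by
  unfold has_two_diff_pairs_alt
  set l := s.toList with hl
  set L := (((l.foldl pvStepB []).reverse.filter (fun p => 2 ≤ p.2)).map Prod.fst) with hL
  have hnd := PySem.Set.nodup_ofList (xs := L)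
  have hmem : ∀ c, c ∈ PySem.Set.ofList L ↔ c ∈ pairChars l := by
    intro c
    rw [PySem.Set.mem_ofList]
    exact doubled_mem l c
  rw [decide_eq_decide]
  rw [nodup_two_le _ hnd]
  constructor
  · rintro ⟨a, ha, b, hb, hab⟩
    exact ⟨a, (hmem a).mp ha, b, (hmem b).mp hb, hab⟩
  · rintro ⟨a, ha, b, hb, hab⟩
    exact ⟨a, (hmem a).mpr ha, b, (hmem b).mpr hb, hab⟩

theorem head_any_iff (f : Char) (rest : List Char) :
    (rest.any (fun c => decide (c ≠ f)) = true) ↔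
      ∃ a ∈ f :: rest, ∃ b ∈ f :: rest, a ≠ b := by
  simp only [List.any_eq_true, decide_eq_true_eq]
  constructor
  · rintro ⟨x, hx, hxf⟩
    exact ⟨f, by simp, x, List.mem_cons_of_mem _ hx, fun h => hxf h.symm⟩
  · rintro ⟨a, ha, b, hb, hab⟩
    rcases List.mem_cons.mp ha with h1 | h1
    · subst h1
      rcases List.mem_cons.mp hb with h2 | h2
      · exact absurd h2.symm hab
      · exact ⟨b, h2, fun h => hab (h.symm)⟩
    · by_cases haf : a = f
      · subst haf
        rcases List.mem_cons.mp hb with h2 | h2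
        · exact absurd h2.symm hab
        · exact ⟨b, h2, fun h => hab h.symm⟩
      · exact ⟨a, h1, haf⟩

-- ===== VERDICT (by name: the statement is the Claim_ definition above) =====
theorem has_two_diff_pairs_spec : Claim_equal_has_two_diff_pairs := by
  intro s _
  unfold Spec_has_two_diff_pairs
  rw [alt_eq s]
  unfold has_two_diff_pairs
  rw [loopA_none_eq s.toList]
  cases hpc : pairChars s.toList with
  | nil => simp
  | cons f rest =>
    show (rest.any (fun c => decide (c ≠ f))) = decide (∃ a ∈ f :: rest, ∃ b ∈ f :: rest, a ≠ b)
    rw [(Bool.decide_coe (rest.any (fun c => decide (c ≠ f)))).symm, decide_eq_decide]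
    exact head_any_iff f rest
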